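-- pv_equiv track=rewrite | github.com/Dain-Art-Studio-therapy/thesis | playspace/sample_code/hw6/17/puzzle_processes.py | groups_of_n
-- ===== SOURCE A (Python) =====
-- def groups_of_n(list, n):
--    grouped = []
--    curGroup = -1
--
--    for i in range(len(list)):
--       if i % n == 0:
--          grouped.append([list[i]])
--          curGroup += 1
--       else:
--          grouped[curGroup].append(list[i])
--    return grouped
-- ===== SOURCE B (Python) =====
-- def groups_of_n(list, n):
--    return [list[i:i + n] for i in range(0, len(list), n)]
-- ===== Notes on version B (the rewrite author's own statement) =====
-- stated objective: simpler
-- what changed: B slices whole chunks at stride-n start indices (one range step and one slice per group) instead of appending element by element under an 'i % n == 0' test while maintaining a current-group cursor; measured constant-factor speedup from bulk slicing.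
-- intended difference: For n < 0 with a nonempty list, A returns the list chunked into groups of |n| (an artefact of its 'i % n == 0' test), while B returns [] (a negative stride yields no chunk starts); producing no groups for a meaningless negative group size is the intended behaviour. — e.g. on groups_of_n([1, 2, 3], -2): A returns [[1, 2], [3]], B returns []
-- outside the precondition, e.g. on groups_of_n([], 0): A returns [], B raises ValueError
import Mathlib
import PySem

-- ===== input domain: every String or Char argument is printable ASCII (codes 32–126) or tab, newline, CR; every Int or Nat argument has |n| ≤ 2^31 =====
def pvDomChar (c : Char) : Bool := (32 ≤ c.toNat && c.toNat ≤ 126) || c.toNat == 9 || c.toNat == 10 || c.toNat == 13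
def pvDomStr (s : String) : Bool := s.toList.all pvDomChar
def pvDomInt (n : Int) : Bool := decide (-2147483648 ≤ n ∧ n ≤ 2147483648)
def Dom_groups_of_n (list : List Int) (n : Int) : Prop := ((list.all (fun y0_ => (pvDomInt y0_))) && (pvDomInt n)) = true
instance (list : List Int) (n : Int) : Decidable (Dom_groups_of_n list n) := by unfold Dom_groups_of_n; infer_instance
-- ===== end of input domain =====

-- B slices whole chunks at stride-n start indices instead of A's element-by-element append
-- under an 'i % n == 0' test with a current-group cursor (objective: simpler).

-- ===== PORT A =====
-- literal transliteration of A: fold over range(len(list)) carrying (grouped, curGroup)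
def groups_of_n (list : List Int) (n : Int) : List (List Int) :=
  ((PySem.List.pyRange 0 (list.length : Int) 1).foldl
    (fun (st : List (List Int) × Int) (i : Int) =>
      if PySem.Int.mod i n == 0 then
        (st.1 ++ [[PySem.List.pyGetD list i 0]], st.2 + 1)
      else
        (PySem.List.pySetD st.1 st.2
          (PySem.List.pyGetD st.1 st.2 [] ++ [PySem.List.pyGetD list i 0]), st.2))
    ([], -1)).1

-- ===== PORT B =====
-- literal transliteration of B: [list[i:i+n] for i in range(0, len(list), n)]
def groups_of_n_alt (list : List Int) (n : Int) : List (List Int) :=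
  (PySem.List.pyRange 0 (list.length : Int) n).map
    (fun i => PySem.List.slice list (some i) (some (i + n)))

-- ===== PRECONDITION & SPEC =====
-- Pre_ excludes n = 0: with a nonempty list A raises ZeroDivisionError; with the empty
-- list A returns [] while B raises ValueError (range step 0) — see claim cites.
def Pre_groups_of_n (list : List Int) (n : Int) : Prop := n ≠ 0
instance (list : List Int) (n : Int) : Decidable (Pre_groups_of_n list n) := by unfold Pre_groups_of_n; infer_instance
def pvWitness_groups_of_n : List Int × Int := ([1, 2, 3, 4, 5], 2)

-- For n < 0 with a nonempty list, A returns the list chunked into groups of |n| (an artefact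
-- of its 'i % n == 0' test), while B returns [] (a negative stride yields no chunk starts);
-- producing no groups for a meaningless negative group size is the intended behaviour.
def D_groups_of_n (list : List Int) (n : Int) : Prop := n < 0 ∧ list ≠ []
instance (list : List Int) (n : Int) : Decidable (D_groups_of_n list n) := by unfold D_groups_of_n; infer_instance

def Spec_groups_of_n (list : List Int) (n : Int) (out : List (List Int)) : Prop := ¬ D_groups_of_n list n → out = groups_of_n_alt list n
instance (list : List Int) (n : Int) (out : List (List Int)) : Decidable (Spec_groups_of_n list n out) := by unfold Spec_groups_of_n; infer_instance

def pvDiffWitness_groups_of_n : List Int × Int := ([1, 2, 3], -2)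
def pvDiffWitnessOut_groups_of_n : (List (List Int)) × (List (List Int)) := ([[1, 2], [3]], [])

-- ===== CLAIM (what is proved, stated in full; the proofs are below) =====
def Claim_unchanged_groups_of_n : Prop := ∀ (list : List Int) (n : Int), Dom_groups_of_n list n → Pre_groups_of_n list n → Spec_groups_of_n list n (groups_of_n list n)
def Claim_changed_groups_of_n : Prop := Dom_groups_of_n (pvDiffWitness_groups_of_n.1) (pvDiffWitness_groups_of_n.2) ∧ Pre_groups_of_n (pvDiffWitness_groups_of_n.1) (pvDiffWitness_groups_of_n.2) ∧ D_groups_of_n (pvDiffWitness_groups_of_n.1) (pvDiffWitness_groups_of_n.2) ∧ groups_of_n (pvDiffWitness_groups_of_n.1) (pvDiffWitness_groups_of_n.2) = pvDiffWitnessOut_groups_of_n.1 ∧ groups_of_n_alt (pvDiffWitness_groups_of_n.1) (pvDiffWitness_groups_of_n.2) = pvDiffWitnessOut_groups_of_n.2 ∧ pvDiffWitnessOut_groups_of_n.1 ≠ pvDiffWitnessOut_groups_of_n.2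
def Claim_exact_groups_of_n : Prop := ∀ (list : List Int) (n : Int), Dom_groups_of_n list n → Pre_groups_of_n list n → D_groups_of_n list n → groups_of_n list n ≠ groups_of_n_alt list n

-- ===== LEMMAS AND PROOFS =====

lemma pvRange_pos_cons (a b s : Int) (hs : 0 < s) (h : a < b) :
    PySem.List.pyRange a b s = a :: PySem.List.pyRange (a + s) b s := by
  rw [PySem.List.pyRange_of_pos a b hs, PySem.List.pyRange_of_pos (a+s) b hs]
  have hc : (b - a + s - 1) / s = (b - a - 1) / s + 1 := by
    rw [show b - a + s - 1 = (b - a - 1) + 1 * s by ring, Int.add_mul_ediv_right _ _ (ne_of_gt hs)]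
  have hnn : 0 ≤ (b - a - 1) / s := Int.ediv_nonneg (by omega) (le_of_lt hs)
  rw [if_pos h, hc]
  by_cases h2 : a + s < b
  · have hc2 : (b - (a + s) + s - 1) / s = (b - a - 1) / s - 1 + 1 := by
      rw [show b - (a + s) + s - 1 = (b - a - 1) + (-1) * s + 1 * s by ring]
      rw [Int.add_mul_ediv_right _ _ (ne_of_gt hs), Int.add_mul_ediv_right _ _ (ne_of_gt hs)]; ring
    have hpos2 : 0 < (b - a - 1) / s := by
      have : 1 ≤ (b - a - 1) / s := by
        rw [Int.le_ediv_iff_mul_le hs]; omega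
      omega
    rw [if_pos h2, hc2]
    rw [show ((b - a - 1) / s + 1).toNat = ((b-a-1)/s - 1 + 1).toNat + 1 by omega]
    rw [List.range_succ_eq_map]
    simp [Function.comp]
    intro k _; push_cast; ring
  · -- a + s ≥ b: left count is 1
    have hz : (b - a - 1) / s = 0 := by
      have hlt : (b - a - 1) / s < 1 := by
        rw [Int.ediv_lt_iff_lt_mul hs]; omega
      omega
    rw [if_neg h2, hz]
    simp

def pvChunk (k : Nat) : List Int → List (List Int)
  | [] => []
  | x :: xs => (x :: xs.take k) :: pvChunk k (xs.drop k)
termination_by xs => xs.length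
decreasing_by simp

lemma pvRange_pos_nil (a b s : Int) (hs : 0 < s) (h : b ≤ a) :
    PySem.List.pyRange a b s = [] := by
  rw [PySem.List.pyRange_of_pos a b hs, if_neg (by omega)]
  simp

lemma pvB_eq_chunk (full : List Int) (n : Int) (hn : 0 < n) :
    ∀ (a : Nat), (PySem.List.pyRange (a : Int) (full.length : Int) n).map
        (fun i => PySem.List.slice full (some i) (some (i + n)))
      = pvChunk (n.toNat - 1) (full.drop a) := by
  have key : ∀ (m : Nat) (a : Nat), full.length - a ≤ m →
      (PySem.List.pyRange (a : Int) (full.length : Int) n).map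
        (fun i => PySem.List.slice full (some i) (some (i + n)))
      = pvChunk (n.toNat - 1) (full.drop a) := by
    intro m
    induction m with
    | zero =>
      intro a ha
      have hge : full.length ≤ a := by omega
      rw [pvRange_pos_nil _ _ _ hn (by exact_mod_cast hge)]
      rw [List.drop_eq_nil_of_le hge]
      simp [pvChunk]
    | succ m ih =>
      intro a ha
      by_cases hlt : a < full.length
      · rw [pvRange_pos_cons _ _ _ hn (by exact_mod_cast hlt)]
        obtain ⟨x, xs, hd⟩ : ∃ x xs, full.drop a = x :: xs := by
          cases hdd : full.drop a with
          | nil => exact absurd (List.drop_eq_nil_iff.mp hdd) (by omega)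
          | cons x xs => exact ⟨x, xs, rfl⟩
        have hnn : 1 ≤ n.toNat := by omega
        rw [List.map_cons]
        rw [PySem.List.slice_toNat full (by positivity) (by omega)]
        rw [show ((a:Int) + n).toNat = a + n.toNat by omega, Int.toNat_natCast]
        rw [show (a:Int) + n = ((a + n.toNat : Nat) : Int) by omega]
        rw [ih (a + n.toNat) (by omega)]
        rw [hd, ← List.drop_drop, hd]
        rw [show a + n.toNat - a = n.toNat by omega]
        cases hk : n.toNat with
        | zero => omega
        | succ k =>
          simp only [List.take_succ_cons, List.drop_succ_cons, pvChunk]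
          simp
      · have hge : full.length ≤ a := by omega
        rw [pvRange_pos_nil _ _ _ hn (by exact_mod_cast hge)]
        rw [List.drop_eq_nil_of_le hge]
        simp [pvChunk]
  intro a; exact key (full.length - a) a le_rfl

def pvF (list : List Int) (n : Int) (st : List (List Int) × Int) (i : Int) : List (List Int) × Int :=
  if PySem.Int.mod i n == 0 then
    (st.1 ++ [[PySem.List.pyGetD list i 0]], st.2 + 1)
  else
    (PySem.List.pySetD st.1 st.2
      (PySem.List.pyGetD st.1 st.2 [] ++ [PySem.List.pyGetD list i 0]), st.2)

lemma pvSet_append_last {α : Type} (g : List α) (p q : α) :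
    (g ++ [p]).set g.length q = g ++ [q] := by
  induction g with
  | nil => rfl
  | cons a g ih => simp [ih]

lemma pvGetD_append_last (g : List (List Int)) (p : List Int) :
    (g ++ [p]).getD g.length [] = p := by
  induction g with
  | nil => rfl
  | cons a g ih => simpa using ih

lemma pvHelper1 (nn a : Nat) (hnn : 1 ≤ nn) (h : a % nn = 0) :
    (nn - (a + 1) % nn) % nn = nn - 1 := by
  have h1 : (a + 1) % nn = 1 % nn := by
    rw [Nat.add_mod, h, Nat.zero_add, Nat.mod_mod]
  rcases Nat.lt_or_ge 1 nn with h2 | h2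
  · rw [h1, Nat.mod_eq_of_lt h2, Nat.mod_eq_of_lt (by omega)]
  · have : nn = 1 := by omega
    subst this; omega

lemma pvHelper1' (nn a : Nat) (hnn : 1 ≤ nn) (h : a % nn = 0) :
    (nn - a % nn) % nn = 0 := by
  rw [h, Nat.sub_zero, Nat.mod_self]

lemma pvHelper2 (nn a : Nat) (hnn : 1 ≤ nn) (h : a % nn ≠ 0) :
    (nn - (a + 1) % nn) % nn = (nn - a % nn) % nn - 1 ∧ 1 ≤ (nn - a % nn) % nn := by
  have hr : a % nn < nn := Nat.mod_lt _ (by omega)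
  have hr1 : 1 ≤ a % nn := by omega
  have hnn2 : 2 ≤ nn := by
    rcases eq_or_lt_of_le hnn with h2 | h2
    · exact absurd (h2 ▸ Nat.mod_one a) h
    · omega
  have h1 : (a + 1) % nn = (a % nn + 1) % nn := by
    conv_lhs => rw [Nat.add_mod, Nat.mod_eq_of_lt (show 1 < nn by omega)]
  have htr : (nn - a % nn) % nn = nn - a % nn := Nat.mod_eq_of_lt (by omega)
  by_cases hc : a % nn + 1 = nn
  · rw [h1, hc, Nat.mod_self, Nat.sub_zero, Nat.mod_self, htr]
    omega
  · have : (a % nn + 1) % nn = a % nn + 1 := Nat.mod_eq_of_lt (by omega)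
    rw [h1, this, Nat.mod_eq_of_lt (by omega), htr]
    omega

lemma pvMod_cond (a : Nat) (n : Int) (hn : 0 < n) :
    (PySem.Int.mod (a : Int) n == 0) = (a % n.toNat == 0) := by
  rw [PySem.Int.mod_eq_emod_of_pos hn]
  obtain ⟨m, hm⟩ : ∃ m : Nat, n = (m : Int) := ⟨n.toNat, by omega⟩
  subst hm
  rw [← Int.natCast_mod, Int.toNat_natCast]
  by_cases hz : a % m = 0 <;> simp [hz, Int.natCast_dvd_natCast, Nat.dvd_iff_mod_eq_zero]

lemma pvGetD_drop (full : List Int) (a : Nat) (x : Int) (xs : List Int)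
    (hd : full.drop a = x :: xs) : full.getD a 0 = x := by
  have : full[a]? = some x := by
    rw [← List.head?_drop, hd]; rfl
  simp [List.getD, this]

lemma pvA_loop (full : List Int) (n : Int) (hn : 0 < n) :
    ∀ (xs : List Int) (a : Nat) (g : List (List Int)) (p : List Int),
      full.drop a = xs →
      (PySem.List.pyRange (a : Int) (full.length : Int) 1).foldl (pvF full n) (g ++ [p], (g.length : Int))
        = (g ++ (p ++ xs.take ((n.toNat - a % n.toNat) % n.toNat))
              :: pvChunk (n.toNat - 1) (xs.drop ((n.toNat - a % n.toNat) % n.toNat)),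
           ((g.length + 1 + (pvChunk (n.toNat - 1) (xs.drop ((n.toNat - a % n.toNat) % n.toNat))).length : Nat) : Int) - 1) := by
  have hnn : 1 ≤ n.toNat := by omega
  intro xs
  induction xs with
  | nil =>
    intro a g p hd
    have hge : full.length ≤ a := by
      have := congrArg List.length hd
      simp at this; omega
    rw [PySem.List.pyRange_one_eq_nil (by exact_mod_cast hge)]
    simp [pvChunk]
  | cons x xs ih =>
    intro a g p hd
    have hlt : a < full.length := by
      have := congrArg List.length hd
      simp at this; omega
    rw [PySem.List.pyRange_one_cons (by exact_mod_cast hlt)]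
    rw [List.foldl_cons]
    have hx : PySem.List.pyGetD full (a : Int) 0 = x := by
      rw [PySem.List.pyGetD_natCast]
      exact pvGetD_drop full a x xs hd
    have hd' : full.drop (a + 1) = xs := by
      rw [← List.drop_drop, hd]; rfl
    by_cases hm : a % n.toNat = 0
    · -- new group starts at index a
      have hcond : (PySem.Int.mod (a : Int) n == 0) = true := by
        rw [pvMod_cond a n hn]; simp [hm]
      rw [show pvF full n (g ++ [p], (g.length : Int)) (a : Int)
          = ((g ++ [p]) ++ [[x]], ((g ++ [p]).length : Int)) by
        simp [pvF, hcond, hx]]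
      rw [show ((a : Nat) : Int) + 1 = (((a + 1 : Nat)) : Int) by push_cast; ring]
      rw [ih (a + 1) (g ++ [p]) [x] hd']
      rw [pvHelper1 n.toNat a hnn hm, pvHelper1' n.toNat a hnn hm]
      simp only [List.take_zero, List.drop_zero, List.append_nil]
      rw [show pvChunk (n.toNat - 1) (x :: xs)
          = (x :: xs.take (n.toNat - 1)) :: pvChunk (n.toNat - 1) (xs.drop (n.toNat - 1)) by
        simp [pvChunk]]
      simp
      push_cast; ring
    · -- append to current group
      have hcond : (PySem.Int.mod (a : Int) n == 0) = false := by
        rw [pvMod_cond a n hn]; simp [hm]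
      rw [show pvF full n (g ++ [p], (g.length : Int)) (a : Int)
          = (g ++ [p ++ [x]], (g.length : Int)) by
        simp only [pvF, hcond, Bool.false_eq_true, if_false]
        rw [show ((g.length : Nat) : Int) = ((g.length : Nat) : Int) from rfl]
        simp only [PySem.List.pySetD_natCast, PySem.List.pyGetD_natCast]
        rw [pvGetD_append_last, pvSet_append_last, pvGetD_drop full a x xs hd]]
      rw [show ((a : Nat) : Int) + 1 = (((a + 1 : Nat)) : Int) by push_cast; ring]
      rw [ih (a + 1) g (p ++ [x]) hd']
      obtain ⟨ht, ht1⟩ := pvHelper2 n.toNat a hnn hm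
      rw [ht]
      set t := (n.toNat - a % n.toNat) % n.toNat with hts
      rw [show (x :: xs).take t = x :: xs.take (t - 1) by
        cases htc : t with
        | zero => omega
        | succ u => simp]
      rw [show (x :: xs).drop t = xs.drop (t - 1) by
        cases htc : t with
        | zero => omega
        | succ u => simp]
      simp

lemma pvA_eq_chunk (list : List Int) (n : Int) (hn : 0 < n) :
    groups_of_n list n = pvChunk (n.toNat - 1) list := by
  have hnn : 1 ≤ n.toNat := by omega
  rw [show groups_of_n list n
      = ((PySem.List.pyRange 0 (list.length : Int) 1).foldl (pvF list n) ([], -1)).1 from rfl]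
  cases list with
  | nil => simp [pvChunk]
  | cons x rest =>
    have hlen : (0 : Int) < ((x :: rest).length : Int) := by simp
    rw [PySem.List.pyRange_one_cons hlen, List.foldl_cons]
    have hcond : (PySem.Int.mod (0 : Int) n == 0) = true := by
      simp [PySem.Int.mod, Int.zero_fmod]
    have hget : PySem.List.pyGetD (x :: rest) (0 : Int) 0 = x := by
      simp [PySem.List.pyGetD_zero]
    have hstep : pvF (x :: rest) n (([], -1) : List (List Int) × Int) 0
        = (([] : List (List Int)) ++ [[x]], ((List.length ([] : List (List Int)) : Nat) : Int)) := by
      simp [pvF, hcond, hget]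
    rw [hstep]
    rw [show (0 : Int) + 1 = ((1 : Nat) : Int) from rfl]
    rw [pvA_loop (x :: rest) n hn rest 1 [] [x] (by simp)]
    have ht : (n.toNat - 1 % n.toNat) % n.toNat = n.toNat - 1 := by
      have := pvHelper1 n.toNat 0 hnn (Nat.zero_mod _)
      simpa using this
    rw [ht]
    simp [pvChunk]

lemma pvB_neg (list : List Int) (n : Int) (hn : n < 0) :
    groups_of_n_alt list n = [] := by
  unfold groups_of_n_alt PySem.List.pyRange
  rw [if_neg (by omega : ¬ n = 0)]
  simp only [show ¬ (0 : Int) < n by omega, if_false]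
  rw [if_neg (by omega : ¬ ((list.length : Int) < 0))]
  simp

lemma pvFold_ne_nil (full : List Int) (n : Int) :
    ∀ (l : List Int) (st : List (List Int) × Int), st.1 ≠ [] →
      ((l.foldl (pvF full n) st).1) ≠ [] := by
  intro l
  induction l with
  | nil => intro st h; simpa using h
  | cons i l ih =>
    intro st h
    rw [List.foldl_cons]
    apply ih
    unfold pvF
    by_cases hc : PySem.Int.mod i n == 0
    · simp [hc]
    · simp only [hc, Bool.false_eq_true, if_false]
      intro hnil
      have := congrArg List.length hnil
      rw [PySem.List.length_pySetD] at this
      simp at this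
      exact h this

lemma pvA_ne_nil (list : List Int) (n : Int) (hn : n ≠ 0) (hl : list ≠ []) :
    groups_of_n list n ≠ [] := by
  rw [show groups_of_n list n
      = ((PySem.List.pyRange 0 (list.length : Int) 1).foldl (pvF list n) ([], -1)).1 from rfl]
  cases list with
  | nil => exact absurd rfl hl
  | cons x rest =>
    have hlen : (0 : Int) < ((x :: rest).length : Int) := by simp
    rw [PySem.List.pyRange_one_cons hlen, List.foldl_cons]
    apply pvFold_ne_nil
    have hcond : (PySem.Int.mod (0 : Int) n == 0) = true := by
      simp [PySem.Int.mod, Int.zero_fmod]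
    simp [pvF, hcond]

-- ===== VERDICT (by name: the statement is the Claim_ definition above) =====
theorem groups_of_n_spec : Claim_unchanged_groups_of_n := by
  intro list n _ hpre hnd
  unfold Pre_groups_of_n at hpre
  unfold D_groups_of_n at hnd
  rcases lt_trichotomy n 0 with hneg | hz | hpos
  · have hl : list = [] := by
      by_contra h; exact hnd ⟨hneg, h⟩
    subst hl
    simp [groups_of_n, groups_of_n_alt, PySem.List.pyRange]
  · exact absurd hz hpre
  · rw [pvA_eq_chunk list n hpos]
    rw [show groups_of_n_alt list n
        = (PySem.List.pyRange ((0 : Nat) : Int) (list.length : Int) n).map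
            (fun i => PySem.List.slice list (some i) (some (i + n))) from rfl]
    rw [pvB_eq_chunk list n hpos 0]
    rfl

theorem groups_of_n_changed : Claim_changed_groups_of_n := by
  unfold Claim_changed_groups_of_n; decide

theorem groups_of_n_tight : Claim_exact_groups_of_n := by
  intro list n _ hpre hd
  rw [pvB_neg list n hd.1]
  exact pvA_ne_nil list n hpre hd.2
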